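-- pv_equiv track=rewrite | github.com/sabnak/kbtracker | tests/research/save_decompiler/kb_shop_extractor/v2026-01-04/kb_save_format.py | parse_slash_separated
-- ===== SOURCE A (Python) =====
-- def parse_slash_separated(content_string: str) -> list[tuple[str, int]]:
-- 	"""
-- 	Parse slash-separated format: "name/qty/name/qty/..."
--
-- 	:param content_string:
-- 		The content string from SlashSeparatedSection
-- 	:return:
-- 		List of (name, quantity) tuples
-- 	"""
-- 	parts = content_string.split('/')
-- 	items = []
--
-- 	i = 0
-- 	while i < len(parts) - 1:
-- 		name = parts[i]
-- 		try:
-- 			quantity = int(parts[i + 1])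
-- 			items.append((name, quantity))
-- 			i += 2
-- 		except (ValueError, IndexError):
-- 			i += 1
--
-- 	return items
-- ===== SOURCE B (Python) =====
-- def _to_int(p):
--     try:
--         return int(p)
--     except ValueError:
--         return None
--
--
-- def parse_slash_separated(content_string: str) -> list[tuple[str, int]]:
--     parts = content_string.split('/')
--     nums = [_to_int(p) for p in parts]
--     # a part is consumed as a quantity iff it parses and the previous part was not
--     flags = []
--     prev = False
--     for v in nums[1:]:
--         prev = v is not None and not prev
--         flags.append(prev)
--     return [(n, v) for n, v, f in zip(parts, nums[1:], flags) if f]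
-- ===== Notes on version B (the rewrite author's own statement) =====
-- stated objective: alternative
-- what changed: Replaced A's try/except while-loop with variable index jumps (+=2 on a parsed quantity, +=1 on ValueError) by staged passes: parse every part once into Optional ints, compute consumed-as-quantity flags by the recurrence flag[j] = (part j parses) and not flag[j-1], then emit the pairs with a single zip-filter comprehension.
import Mathlib
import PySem

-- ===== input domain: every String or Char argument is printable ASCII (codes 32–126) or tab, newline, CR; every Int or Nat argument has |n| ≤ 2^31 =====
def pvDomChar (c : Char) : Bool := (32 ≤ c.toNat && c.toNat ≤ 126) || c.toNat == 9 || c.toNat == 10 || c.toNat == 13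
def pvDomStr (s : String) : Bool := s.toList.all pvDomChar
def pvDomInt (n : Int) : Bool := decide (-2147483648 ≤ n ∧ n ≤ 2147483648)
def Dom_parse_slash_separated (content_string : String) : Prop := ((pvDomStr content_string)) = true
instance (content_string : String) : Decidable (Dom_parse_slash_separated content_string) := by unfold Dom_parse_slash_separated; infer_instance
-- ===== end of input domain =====

-- B replaces A's try/except index-jumping while-loop by staged passes: parse every
-- part once, compute consumed-as-quantity flags by a boolean recurrence, then emit
-- the pairs with a zip-filter (objective: alternative).

-- ===== PORT A =====
-- A's while loop: i steps by 2 on a successful int() parse, by 1 on ValueError.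
def pvAloop (parts : List String) (i : Nat) (items : List (String × Int)) :
    List (String × Int) :=
  if h : i + 1 < parts.length then
    match PySem.Int.ofStr? parts[i + 1] with
    | some q => pvAloop parts (i + 2) (items ++ [(parts[i], q)])
    | none => pvAloop parts (i + 1) items
  else items
termination_by parts.length - i

-- content_string.split('/'): sep "/" ≠ "", so split? always returns some
def parse_slash_separated (content_string : String) : List (String × Int) :=
  pvAloop ((PySem.Str.split? content_string "/").getD []) 0 []

-- ===== PORT B =====
-- Source B's flag-building for-loop: prev carried, one flag appended per element
def pvScanFlags : List (Option Int) → Bool → List Bool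
  | [], _ => []
  | v :: rest, prev =>
    let p := v.isSome && !prev
    p :: pvScanFlags rest p

def parse_slash_separated_alt (content_string : String) : List (String × Int) :=
  let parts := (PySem.Str.split? content_string "/").getD []
  let nums := parts.map PySem.Int.ofStr?
  let flags := pvScanFlags (nums.drop 1) false
  -- the zip-filter comprehension: f = true forces the parsed value to be present
  (parts.zip ((nums.drop 1).zip flags)).filterMap
    (fun x => match x with
      | (n, (some q, true)) => some (n, q)
      | _ => none)

-- ===== PRECONDITION & SPEC =====
def Spec_parse_slash_separated (content_string : String) (out : List (String × Int)) : Prop := out = parse_slash_separated_alt content_string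
instance (content_string : String) (out : List (String × Int)) : Decidable (Spec_parse_slash_separated content_string out) := by unfold Spec_parse_slash_separated; infer_instance

-- ===== CLAIM (what is proved, stated in full; the proofs are below) =====
def Claim_equal_parse_slash_separated : Prop := ∀ (content_string : String), Dom_parse_slash_separated content_string → Spec_parse_slash_separated content_string (parse_slash_separated content_string)

-- ===== LEMMAS AND PROOFS =====

-- common reference form: pairing by structural recursion with the previous-consumed flag
def pvH : List String → Bool → List (String × Int)
  | [], _ => []
  | [_], _ => []
  | n :: p :: rest, prev =>
    match PySem.Int.ofStr? p, prev with
    | some q, false => (n, q) :: pvH (p :: rest) true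
    | _, _ => pvH (p :: rest) false

lemma pvH_true_eq (p : String) (rest : List String) :
    pvH (p :: rest) true = pvH rest false := by
  cases rest with
  | nil => rfl
  | cons r rest' =>
    cases hq : PySem.Int.ofStr? r <;> simp [pvH, hq]

-- A's loop from index i equals pvH on the remaining parts with a fresh name candidate
lemma pvAloop_eq_pvH (parts : List String) (i : Nat) (items : List (String × Int)) :
    pvAloop parts i items = items ++ pvH (parts.drop i) false := by
  by_cases h : i + 1 < parts.length
  · have hi : i < parts.length := by omega
    have hdrop : parts.drop i = parts[i] :: parts[i + 1] :: parts.drop (i + 2) := by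
      rw [List.drop_eq_getElem_cons hi, List.drop_eq_getElem_cons h]
    rw [pvAloop, dif_pos h]
    cases hq : PySem.Int.ofStr? parts[i + 1] with
    | some q =>
      simp only [hq]
      rw [pvAloop_eq_pvH parts (i + 2) (items ++ [(parts[i], q)]), hdrop]
      simp only [pvH, hq, List.append_assoc, List.singleton_append]
      rw [pvH_true_eq]
    | none =>
      simp only [hq]
      rw [pvAloop_eq_pvH parts (i + 1) items, hdrop, List.drop_eq_getElem_cons h]
      simp [pvH, hq]
  · rw [pvAloop, dif_neg h]
    rcases Nat.lt_or_ge i parts.length with hi | hi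
    · have hd : parts.drop i = [parts[i]] := by
        rw [List.drop_eq_getElem_cons hi, List.drop_eq_nil_of_le (by omega)]
      rw [hd]; simp [pvH]
    · rw [List.drop_eq_nil_of_le hi]; simp [pvH]
termination_by parts.length - i

-- B's staged passes (parse map, flag scan, zip-filter) fuse into pvH
lemma pvB_fuse (n : String) (rest : List String) (prev : Bool) :
    ((n :: rest).zip ((rest.map PySem.Int.ofStr?).zip
        (pvScanFlags (rest.map PySem.Int.ofStr?) prev))).filterMap
      (fun x => match x with
        | (nm, (some q, true)) => some (nm, q)
        | _ => none) = pvH (n :: rest) prev := by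
  induction rest generalizing n prev with
  | nil => rfl
  | cons p rest' ih =>
    show (⟨n, PySem.Int.ofStr? p, _⟩ ::
        ((p :: rest').zip ((rest'.map PySem.Int.ofStr?).zip _))).filterMap _ = _
    cases hq : PySem.Int.ofStr? p with
    | some q =>
      cases prev with
      | false =>
        simp only [List.filterMap_cons]
        show (n, q) :: _ = pvH (n :: p :: rest') false
        unfold pvH
        rw [hq]
        show _ = (n, q) :: pvH (p :: rest') true
        rw [← ih p true]
        simp
      | true =>
        simp only [List.filterMap_cons]
        show _ = pvH (n :: p :: rest') true
        unfold pvH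
        rw [hq]
        show _ = pvH (p :: rest') false
        rw [← ih p false]
        simp
    | none =>
      simp only [List.filterMap_cons]
      show _ = pvH (n :: p :: rest') prev
      unfold pvH
      rw [hq]
      show _ = pvH (p :: rest') false
      rw [← ih p false]
      simp

lemma alt_eq_pvH (s : String) :
    parse_slash_separated_alt s =
      pvH ((PySem.Str.split? s "/").getD []) false := by
  unfold parse_slash_separated_alt
  cases hp : (PySem.Str.split? s "/").getD [] with
  | nil => rfl
  | cons n rest =>
    simp only [List.map_cons, List.drop_succ_cons, List.drop_zero]
    exact pvB_fuse n rest false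

-- ===== VERDICT (by name: the statement is the Claim_ definition above) =====
theorem parse_slash_separated_spec : Claim_equal_parse_slash_separated := by
  intro s _
  show parse_slash_separated s = parse_slash_separated_alt s
  rw [alt_eq_pvH]
  unfold parse_slash_separated
  rw [pvAloop_eq_pvH]
  simp
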